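-- pv_equiv track=rewrite | github.com/YoeriNijs/hr_steganography | __decoder.py | sectors_to_bits
-- ===== SOURCE A (Python) =====
-- def sectors_to_bits(sectors) -> str | None:
--     if len(sectors) < 2:
--         return None
--
--     bits = ''
--     for sector in sectors[1:]:
--         sector_length = len(sector)
--
--         # If we only have one sector here, we just handle that one.
--         if sector_length < 2:
--             current_sector = sector[0]
--             is_even = (current_sector % 2) == 0
--             if is_even:
--                 bits += '0'
--             else:
--                 bits += '1'
--
--         # If we have more than one sector, we iterate over all sectors
--         else:
--             for sector_index in range(0, sector_length):
--                 # If we have had all sectors, just break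
--                 if sector_index == sector_length:
--                     break
--
--                 current_sector = sector[sector_index]
--                 if sector_index == 0:
--                     # Of the current sector bit is the next sector bit,
--                     # we know that we have reached the end of our encoded message.
--                     if sector[sector_index+1] == current_sector:
--                         return bits
--
--                     # Validate the first hr value of the sector. If it is even, decode it to
--                     # 0. If it is odd, decode it to 1.
--                     is_even = (current_sector % 2) == 0
--                     if is_even:
--                         bits += '0'
--                     else:
--                         bits += '1'
--                 else:
--                     # If the current sector is the same as the previous sector,
--                     # we know that we have reached the end of our encoded message.
--                     if sector[sector_index-1] == current_sector:
--                         return bits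
--
--                     # If the current sector value is lower than the previous value,
--                     # we know we can decode it to 0. If the current value is higher,
--                     # this means we can decode it to 1.
--                     prev_sector = sector[sector_index-1]
--                     distance = prev_sector - current_sector
--                     if distance < 0:
--                         bits += '1'
--                     elif distance > 0:
--                         bits += '0'
--     return bits
-- ===== SOURCE B (Python) =====
-- def sectors_to_bits(sectors) -> str | None:
--     if len(sectors) < 2:
--         return None
--     bits = ''
--     for sector in sectors[1:]:
--         if len(sector) < 2:
--             bits += str(sector[0] % 2)
--             continue
--         # staged: build all adjacent pairs, locate every equal pair, cut there, then emit
--         pairs = list(zip(sector, sector[1:]))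
--         stops = [i for i, (a, b) in enumerate(pairs) if a == b]
--         kept = pairs if not stops else pairs[:stops[0]]
--         head = str(sector[0] % 2) if sector[0] != sector[1] else ''
--         bits += head + ''.join('1' if a < b else '0' for a, b in kept)
--         if stops:
--             return bits
--     return bits
-- ===== Notes on version B (the rewrite author's own statement) =====
-- stated objective: alternative
-- what changed: A's fused indexed scan per sector (emit a bit per index, return from deep inside the loop) is replaced by staged passes: build the adjacent-pair list with zip, list every equal-pair position with a filtered enumerate comprehension, cut the pair list at the first such position, and emit the bits by a join over a comprehension; the parity head bit becomes str(sector[0] % 2) guarded by the first pair.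
-- outside the precondition, e.g. on sectors_to_bits([[0], []]): A raises IndexError, B raises IndexError; on sectors_to_bits([[0], [2, 2], []]): A returns '', B returns ''
import Mathlib
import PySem

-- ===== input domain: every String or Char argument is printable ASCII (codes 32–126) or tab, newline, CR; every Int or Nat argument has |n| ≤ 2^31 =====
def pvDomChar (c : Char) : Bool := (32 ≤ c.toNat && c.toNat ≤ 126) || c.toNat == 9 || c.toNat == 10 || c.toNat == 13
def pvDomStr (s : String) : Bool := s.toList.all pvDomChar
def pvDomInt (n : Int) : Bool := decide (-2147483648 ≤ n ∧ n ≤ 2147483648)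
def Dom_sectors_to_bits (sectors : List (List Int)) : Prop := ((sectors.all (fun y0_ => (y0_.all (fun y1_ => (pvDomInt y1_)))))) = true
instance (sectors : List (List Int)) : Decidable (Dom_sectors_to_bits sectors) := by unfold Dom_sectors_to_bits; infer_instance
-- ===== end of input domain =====

-- B replaces A's fused indexed scan with mid-loop returns by staged passes per sector:
-- build the adjacent-pair list, list all equal-pair positions by a filtered enumerate,
-- cut at the first one, then emit the bits by a map; objective: alternative (same cost).


-- ===== PORT A =====
-- bits are accumulated as List Char (Python str concatenation), wrapped with String.ofList at the end.
-- 'none' of the inner Option marks the IndexError of 'sector[0]' on an empty sector (excluded by Pre_).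

-- inner 'for sector_index in range(0, sector_length)' loop of A, over the remaining index list;
-- result: some (bits, stopped?) where stopped = the 'return bits' fired; none = IndexError.
def aInner (sector : List Int) (L : Nat) : List Nat → List Char → Option (List Char × Bool)
  | [], bits => some (bits, false)
  | i :: rest, bits =>
    if i = L then some (bits, false)            -- 'if sector_index == sector_length: break' (dead)
    else
      match PySem.List.pyGet? sector (i : Int) with
      | none => none
      | some cur =>
        if i = 0 then
          match PySem.List.pyGet? sector ((i : Int) + 1) with
          | none => none
          | some nxt =>
            if nxt = cur then some (bits, true)
            else aInner sector L rest (bits ++ (if PySem.Int.mod cur 2 = 0 then ['0'] else ['1']))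
        else
          match PySem.List.pyGet? sector ((i : Int) - 1) with
          | none => none
          | some prev =>
            if prev = cur then some (bits, true)
            else if prev - cur < 0 then aInner sector L rest (bits ++ ['1'])
            else if prev - cur > 0 then aInner sector L rest (bits ++ ['0'])
            else aInner sector L rest bits

-- outer 'for sector in sectors[1:]' loop of A
def aOuter : List (List Int) → List Char → Option (List Char)
  | [], bits => some bits
  | sector :: rs, bits =>
    if sector.length < 2 then
      match PySem.List.pyGet? sector 0 with
      | none => none                             -- IndexError: empty sector
      | some cur => aOuter rs (bits ++ (if PySem.Int.mod cur 2 = 0 then ['0'] else ['1']))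
    else
      match aInner sector sector.length (List.range sector.length) bits with
      | none => none
      | some (bits', true) => some bits'         -- early 'return bits'
      | some (bits', false) => aOuter rs bits'

def sectors_to_bits (sectors : List (List Int)) : Option String :=
  if sectors.length < 2 then none
  else
    match aOuter (PySem.List.slice sectors (some 1) none) [] with
    | none => none                               -- unreachable under Pre_
    | some bits => some (String.ofList bits)

-- ===== PORT B =====
-- outer 'for sector in sectors[1:]' loop of Source B; per sector the staged pipeline
-- pairs → stops → kept → head → piece is computed exactly as in Source B.
def bGo : List (List Int) → List Char → Option (List Char)
  | [], bits => some bits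
  | sector :: rs, bits =>
    if sector.length < 2 then
      match PySem.List.pyGet? sector 0 with
      | none => none                             -- IndexError: empty sector
      | some x => bGo rs (bits ++ (PySem.Int.toStr (PySem.Int.mod x 2)).toList)
    else
      let pairs := sector.zip (PySem.List.slice sector (some 1) none)
      let stops := ((PySem.List.enumerate pairs 0).filter (fun p => p.2.1 == p.2.2)).map Prod.fst
      let kept := match stops with
        | [] => pairs
        | k :: _ => PySem.List.slice pairs none (some k)
      match PySem.List.pyGet? sector 0, PySem.List.pyGet? sector 1 with
      | some a0, some a1 =>                      -- both present: length ≥ 2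
        let head : List Char :=
          if a0 ≠ a1 then (PySem.Int.toStr (PySem.Int.mod a0 2)).toList else []
        let piece := head ++ kept.map (fun p => if p.1 < p.2 then '1' else '0')
        if stops ≠ [] then some (bits ++ piece) else bGo rs (bits ++ piece)
      | _, _ => none                             -- unreachable: length ≥ 2

def sectors_to_bits_alt (sectors : List (List Int)) : Option String :=
  if sectors.length < 2 then none
  else
    match bGo (PySem.List.slice sectors (some 1) none) [] with
    | none => none
    | some bits => some (String.ofList bits)

-- ===== PRECONDITION & SPEC =====
-- Pre_ excludes lists with an empty sector among sectors[1:]: reaching one raises IndexError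
-- (sector[0]) in both A and B; an empty sector sitting after an early stop is unreached (A still
-- returns) but is excluded too, since a closed-form Pre_ cannot tell where the stop happens.
def Pre_sectors_to_bits (sectors : List (List Int)) : Prop :=
  ∀ s ∈ sectors.drop 1, s ≠ []
instance (sectors : List (List Int)) : Decidable (Pre_sectors_to_bits sectors) := by
  unfold Pre_sectors_to_bits; infer_instance

def pvWitness_sectors_to_bits : List (List Int) := [[0], [2, 3, 5], [4], [7, 6]]

def Spec_sectors_to_bits (sectors : List (List Int)) (out : Option String) : Prop := out = sectors_to_bits_alt sectors
instance (sectors : List (List Int)) (out : Option String) : Decidable (Spec_sectors_to_bits sectors out) := by unfold Spec_sectors_to_bits; infer_instance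

-- ===== CLAIM (what is proved, stated in full; the proofs are below) =====
def Claim_equal_sectors_to_bits : Prop := ∀ (sectors : List (List Int)), Dom_sectors_to_bits sectors → Pre_sectors_to_bits sectors → Spec_sectors_to_bits sectors (sectors_to_bits sectors)

-- ===== LEMMAS AND PROOFS =====

-- proof-only bridge: the flag-carrying pair loop A's inner loop reduces to
def pairLoop : List (Int × Int) → List Char → List Char × Bool
  | [], out => (out, false)
  | (prev, cur) :: rest, out =>
    if prev = cur then (out, true)
    else pairLoop rest (out ++ (if prev < cur then ['1'] else ['0']))

-- str(x % 2) is the parity bit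
theorem toStr_mod_two (x : Int) :
    (PySem.Int.toStr (PySem.Int.mod x 2)).toList
      = (if PySem.Int.mod x 2 = 0 then ['0'] else ['1']) := by
  have h0 : 0 ≤ PySem.Int.mod x 2 := PySem.Int.mod_nonneg x (by norm_num)
  have h2 : PySem.Int.mod x 2 < 2 := PySem.Int.mod_lt x (by norm_num)
  rcases (show PySem.Int.mod x 2 = 0 ∨ PySem.Int.mod x 2 = 1 by omega) with h | h
  · simp only [h]; decide
  · simp only [h]; decide

-- proof-only abbreviation of B's 'kept' slice, with take instead of slice
def keptTake (ps : List (Int × Int)) (s : Int) : List Int → List (Int × Int)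
  | [] => ps
  | k :: _ => ps.take (k - s).toNat

-- every index listed by B's 'stops' pass is ≥ the enumerate offset
theorem stops_ge (ps : List (Int × Int)) (s k : Int)
    (hk : k ∈ ((PySem.List.enumerate ps s).filter
        (fun p : Int × (Int × Int) => p.2.1 == p.2.2)).map Prod.fst) :
    s ≤ k := by
  rcases List.mem_map.1 hk with ⟨p, hp, rfl⟩
  rcases (PySem.List.mem_enumerate_iff _ _ _).1 (List.mem_of_mem_filter hp) with ⟨j, hj, rfl⟩
  simp

-- the fused pair loop equals B's staged stops/kept computation
theorem pairLoop_eq_staged (ps : List (Int × Int)) :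
    ∀ (s : Int) (acc : List Char),
    pairLoop ps acc
      = (acc ++ (keptTake ps s (((PySem.List.enumerate ps s).filter
                   (fun p : Int × (Int × Int) => p.2.1 == p.2.2)).map Prod.fst)).map
                 (fun p => if p.1 < p.2 then '1' else '0'),
         !(((PySem.List.enumerate ps s).filter
             (fun p : Int × (Int × Int) => p.2.1 == p.2.2)).map Prod.fst).isEmpty) := by
  induction ps with
  | nil => intro s acc; simp [pairLoop, keptTake]
  | cons p rest ih =>
    intro s acc
    obtain ⟨a, b⟩ := p
    rw [PySem.List.enumerate_cons]
    by_cases hab : a = b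
    · simp [pairLoop, hab, keptTake]
    · have hfc : List.filter (fun p : Int × (Int × Int) => p.2.1 == p.2.2)
          ((s, (a, b)) :: PySem.List.enumerate rest (s + 1))
          = List.filter (fun p : Int × (Int × Int) => p.2.1 == p.2.2)
              (PySem.List.enumerate rest (s + 1)) := by
        rw [List.filter_cons]
        simp [hab]
      rw [hfc]
      simp only [pairLoop, if_neg hab, ih (s + 1)]
      rcases hst : ((PySem.List.enumerate rest (s + 1)).filter
          (fun p : Int × (Int × Int) => p.2.1 == p.2.2)).map Prod.fst with _ | ⟨k, ks⟩
      · simp only [keptTake, List.map_cons]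
        by_cases hab2 : a < b <;> simp [hab2]
      · have hks : s + 1 ≤ k := stops_ge rest (s + 1) k (by rw [hst]; exact List.mem_cons_self ..)
        have htk : ((a, b) :: rest).take (k - s).toNat = (a, b) :: rest.take (k - (s + 1)).toNat := by
          have hkk : (k - s).toNat = (k - (s + 1)).toNat + 1 := by omega
          rw [hkk, List.take_succ_cons]
        simp only [keptTake, htk, List.map_cons]
        by_cases hab2 : a < b <;> simp [hab2, List.append_assoc]

-- A's inner loop from index i ≥ 1 equals the pair loop over the remaining adjacent pairs
theorem aInner_eq_pairLoop (s : List Int) (n : Nat) :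
    ∀ (i : Nat) (bits : List Char), 1 ≤ i → s.length - i = n →
    aInner s s.length (List.range' i n) bits
      = some (pairLoop ((s.drop (i - 1)).zip (s.drop i)) bits) := by
  induction n with
  | zero =>
    intro i bits h1 hn
    have hle : s.length ≤ i := by omega
    simp [aInner, List.drop_eq_nil_of_le hle, pairLoop]
  | succ n ih =>
    intro i bits h1 hn
    have hi : i < s.length := by omega
    have hi1 : i - 1 < s.length := by omega
    have hiL : ¬ i = s.length := by omega
    have hi0 : ¬ i = 0 := by omega
    have hget : PySem.List.pyGet? s (i : Int) = some s[i] := by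
      rw [PySem.List.pyGet?_natCast]; exact List.getElem?_eq_getElem hi
    have hcast : ((i : Int) - 1) = ((i - 1 : Nat) : Int) := by
      push_cast [Nat.cast_sub h1]; ring
    have hget' : PySem.List.pyGet? s ((i : Int) - 1) = some s[i - 1] := by
      rw [hcast, PySem.List.pyGet?_natCast]; exact List.getElem?_eq_getElem hi1
    have hdrop2 : s.drop i = s[i] :: s.drop (i + 1) := List.drop_eq_getElem_cons hi
    have hdrop1 : s.drop (i - 1) = s[i - 1] :: s.drop i := by
      rw [List.drop_eq_getElem_cons hi1, show i - 1 + 1 = i by omega]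
    have hzip : (s.drop (i - 1)).zip (s.drop i)
        = (s[i - 1], s[i]) :: (s.drop i).zip (s.drop (i + 1)) := by
      rw [hdrop1, hdrop2, List.zip_cons_cons, ← hdrop2]
    have ihs := fun bits => ih (i + 1) bits (by omega) (by omega)
    simp only [Nat.add_sub_cancel] at ihs
    rw [List.range'_succ]
    simp only [aInner, if_neg hiL, hget, if_neg hi0, hget']
    rw [hzip]
    simp only [pairLoop]
    by_cases heq : s[i - 1] = s[i]
    · simp [heq]
    · rw [if_neg heq, if_neg heq]
      by_cases hlt : s[i - 1] < s[i]
      · have h1' : s[i - 1] - s[i] < 0 := by omega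
        rw [if_pos h1', if_pos hlt, ihs]
      · have h1' : ¬ s[i - 1] - s[i] < 0 := by omega
        have h2' : s[i - 1] - s[i] > 0 := by
          rcases lt_trichotomy s[i - 1] s[i] with h | h | h
          · exact absurd h hlt
          · exact absurd h heq
          · omega
        rw [if_neg h1', if_pos h2', if_neg hlt, ihs]

-- A's inner loop over the full index range, as the pair loop seeded with the parity bit
theorem aInner_full (s : List Int) (bits : List Char) (h2 : 2 ≤ s.length) :
    aInner s s.length (List.range s.length) bits
      = (if s[1]'(by omega) = s[0]'(by omega) then some (bits, true)
         else some (pairLoop (s.zip (s.drop 1))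
             (bits ++ (if PySem.Int.mod (s[0]'(by omega)) 2 = 0 then ['0'] else ['1'])))) := by
  have h0 : 0 < s.length := by omega
  have h1 : 1 < s.length := by omega
  have hrange : List.range s.length = 0 :: List.range' 1 (s.length - 1) := by
    rw [List.range_eq_range', show s.length = (s.length - 1) + 1 by omega, List.range'_succ]
    simp
  have hg0 : PySem.List.pyGet? s (((0 : Nat) : Int)) = some s[0] := by
    rw [PySem.List.pyGet?_natCast]; exact List.getElem?_eq_getElem h0
  have hg1 : PySem.List.pyGet? s (((0 : Nat) : Int) + 1) = some s[1] := by
    rw [show (((0 : Nat) : Int) + 1) = ((1 : Nat) : Int) by norm_num, PySem.List.pyGet?_natCast]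
    exact List.getElem?_eq_getElem h1
  have h0L : ¬ (0 : Nat) = s.length := by omega
  rw [hrange]
  simp only [aInner, if_neg h0L, hg0, hg1, if_true]
  by_cases heq : s[1] = s[0]
  · rw [if_pos heq, if_pos heq]
  · rw [if_neg heq, if_neg heq,
      aInner_eq_pairLoop s (s.length - 1) 1 _ le_rfl rfl]
    simp

-- the outer loops agree on any tail of nonempty sectors
theorem aOuter_eq_bGo (rest : List (List Int)) :
    ∀ bits, (∀ s ∈ rest, s ≠ []) → aOuter rest bits = bGo rest bits := by
  induction rest with
  | nil => intro bits _; rfl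
  | cons sector rs ih =>
    intro bits hne
    have hsn : sector ≠ [] := hne sector (by simp)
    have hrs : ∀ s ∈ rs, s ≠ [] := fun s hs => hne s (by simp [hs])
    by_cases hl : sector.length < 2
    · -- singleton sector: both take the parity branch
      have hpos : 0 < sector.length := List.length_pos_of_ne_nil hsn
      have hget : PySem.List.pyGet? sector 0 = some sector[0] := by
        rw [show (0 : Int) = ((0 : Nat) : Int) by norm_num, PySem.List.pyGet?_natCast]
        exact List.getElem?_eq_getElem hpos
      simp only [aOuter, bGo, if_pos hl, hget]
      rw [toStr_mod_two, ih _ hrs]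
    · -- sector = x0 :: x1 :: t
      have h2 : 2 ≤ sector.length := by omega
      rcases sector with _ | ⟨x0, t0⟩
      · simp at h2
      rcases t0 with _ | ⟨x1, t⟩
      · simp at h2
      have hg0 : PySem.List.pyGet? (x0 :: x1 :: t) 0 = some x0 := by
        rw [show (0 : Int) = ((0 : Nat) : Int) by norm_num, PySem.List.pyGet?_natCast]; simp
      have hg1 : PySem.List.pyGet? (x0 :: x1 :: t) 1 = some x1 := by
        rw [show (1 : Int) = ((1 : Nat) : Int) by norm_num, PySem.List.pyGet?_natCast]; simp
      have hslice : PySem.List.slice (x0 :: x1 :: t) (some 1) none = x1 :: t := by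
        simpa using PySem.List.slice_from (xs := x0 :: x1 :: t) (a := 1) (by norm_num)
      have hfull := aInner_full (x0 :: x1 :: t) bits h2
      simp only [List.getElem_cons_zero, List.getElem_cons_succ, List.drop_succ_cons,
        List.drop_zero] at hfull
      simp only [aOuter, bGo, if_neg hl, hfull, hg0, hg1, hslice]
      have hzc : (x0 :: x1 :: t).zip (x1 :: t) = (x0, x1) :: (x1 :: t).zip t :=
        List.zip_cons_cons ..
      by_cases heq : x1 = x0
      · -- first pair equal: A returns bits; B: stops starts with 0, kept and head empty
        rw [if_pos heq]
        have hstops : ((PySem.List.enumerate ((x0 :: x1 :: t).zip (x1 :: t)) 0).filter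
            (fun p : Int × (Int × Int) => p.2.1 == p.2.2)).map Prod.fst
            = (0 : Int) :: ((PySem.List.enumerate ((x1 :: t).zip t) 1).filter
                (fun p : Int × (Int × Int) => p.2.1 == p.2.2)).map Prod.fst := by
          rw [hzc, PySem.List.enumerate_cons, List.filter_cons]
          simp [heq]
        have hsl0 : ∀ (qs : List (Int × Int)), PySem.List.slice qs none (some (0 : Int)) = [] :=
          fun qs => by
            simpa using PySem.List.slice_to (xs := qs) (b := (0 : Int)) (by norm_num)
        simp [heq, hsl0]
      · rw [if_neg heq]
        have hane : x0 ≠ x1 := fun h => heq h.symm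
        rw [toStr_mod_two,
          pairLoop_eq_staged ((x0 :: x1 :: t).zip (x1 :: t)) 0 (bits ++ _)]
        simp only [if_pos hane]
        rcases hst : ((PySem.List.enumerate ((x0 :: x1 :: t).zip (x1 :: t)) 0).filter
            (fun p : Int × (Int × Int) => p.2.1 == p.2.2)).map Prod.fst with _ | ⟨k, ks⟩
        · simp [keptTake, ih _ hrs, List.append_assoc]
        · have hk0 : (0 : Int) ≤ k :=
            stops_ge _ 0 k (by rw [hst]; exact List.mem_cons_self ..)
          have hsl : PySem.List.slice ((x0, x1) :: (x1 :: t).zip t) none (some k)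
              = ((x0, x1) :: (x1 :: t).zip t).take k.toNat :=
            PySem.List.slice_to (xs := (x0, x1) :: (x1 :: t).zip t) (b := k) hk0
          simp only [keptTake, hzc]
          simp [hsl, -List.map_take, List.append_assoc]

-- ===== VERDICT (by name: the statement is the Claim_ definition above) =====
theorem sectors_to_bits_spec : Claim_equal_sectors_to_bits := by
  intro sectors _ hpre
  unfold Spec_sectors_to_bits sectors_to_bits sectors_to_bits_alt
  by_cases hl : sectors.length < 2
  · simp [hl]
  · have hslice : PySem.List.slice sectors (some 1) none = sectors.drop 1 := by
      simpa using PySem.List.slice_from (xs := sectors) (a := 1) (by norm_num)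
    rw [if_neg hl, if_neg hl, hslice, aOuter_eq_bGo _ _ hpre]
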